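-- pv_equiv track=rewrite | github.com/EvanSun96/codesignal | robinhoodprep.py | digitAnagrams
-- ===== SOURCE A (Python) =====
-- import collections
--
-- def digitAnagrams(a):
--     if not a or len(a) < 2:
--         return 0
--     mp = collections.defaultdict(int)
--     for num in a:
--         k = int(''.join(sorted(str(num))))
--         mp[k] += 1
--     res = 0
--     for val in mp.values():
--         cur = val - 1
--         while cur:
--             res += cur
--             cur -= 1
--     return res
-- ===== SOURCE B (Python) =====
-- def digitAnagrams(a):
--     seen = {}
--     res = 0
--     for num in a:
--         key = int(''.join(sorted(str(num))))
--         c = seen.get(key, 0)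
--         res += c
--         seen[key] = c + 1
--     return res
-- ===== Notes on version B (the rewrite author's own statement) =====
-- stated objective: alternative
-- what changed: Replaces the two-phase group-then-triangular-sum structure (build a full counter dict, then an inner while loop summing cur, cur-1, ... per value) with a single incremental pass that, for each element, adds the number of previously seen elements with the same sorted-digit key.
import Mathlib
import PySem

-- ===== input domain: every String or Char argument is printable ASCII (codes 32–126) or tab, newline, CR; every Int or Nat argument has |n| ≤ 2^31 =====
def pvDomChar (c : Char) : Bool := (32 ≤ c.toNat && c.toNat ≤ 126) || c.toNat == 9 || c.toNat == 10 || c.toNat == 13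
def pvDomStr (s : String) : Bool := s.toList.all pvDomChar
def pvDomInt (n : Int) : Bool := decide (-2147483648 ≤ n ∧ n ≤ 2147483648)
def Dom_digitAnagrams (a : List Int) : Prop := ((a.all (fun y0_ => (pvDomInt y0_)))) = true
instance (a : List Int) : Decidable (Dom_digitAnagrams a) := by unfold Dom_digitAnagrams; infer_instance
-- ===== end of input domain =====

-- B replaces A's group-then-triangular-sum two-phase count with one incremental pass
-- (res += number of previously seen equal-key elements); return-value equivalence, no mutation.

-- ===== PORT A =====
-- k = int(''.join(sorted(str(num)))): sorted over str(num)'s chars, joined, parsed by int().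
-- int() never fails on these strings ('-' sorts before the digits), so the .getD 0 branch is unreachable.
def pyKey (num : Int) : Int :=
  (PySem.Int.ofChars? (PySem.List.sorted (PySem.Int.toChars num) (fun c => c) false)).getD 0

-- the inner `cur = val - 1; while cur: res += cur; cur -= 1` loop: counter values are ≥ 1,
-- so cur ≥ 0 and `while cur:` counts cur down to 0, adding cur each time; fuel = cur.toNat (exact here).
def digitAnagramsTri : Nat → Int → Int
  | 0, res => res
  | n + 1, res => digitAnagramsTri n (res + (n + 1 : Nat))

def digitAnagrams (a : List Int) : Int :=
  if a = [] ∨ (a.length : Int) < 2 then 0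
  else
    let mp := a.foldl (fun d num => d.modify (pyKey num) 0 (· + 1))
      (PySem.Dict.empty : PySem.Dict Int Int)
    mp.values.foldl (fun res val => digitAnagramsTri (val - 1).toNat res) 0

-- ===== PORT B =====
def digitAnagrams_alt (a : List Int) : Int :=
  (a.foldl (fun st num =>
      let key := pyKey num
      let c := st.2.getD key 0
      (st.1 + c, st.2.insert key (c + 1)))
    ((0 : Int), (PySem.Dict.empty : PySem.Dict Int Int))).1

-- ===== PRECONDITION & SPEC =====
def Spec_digitAnagrams (a : List Int) (out : Int) : Prop := out = digitAnagrams_alt a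
instance (a : List Int) (out : Int) : Decidable (Spec_digitAnagrams a out) := by unfold Spec_digitAnagrams; infer_instance

-- ===== CLAIM (what is proved, stated in full; the proofs are below) =====
def Claim_equal_digitAnagrams : Prop := ∀ (a : List Int), Dom_digitAnagrams a → Spec_digitAnagrams a (digitAnagrams a)

-- ===== LEMMAS AND PROOFS =====

-- C(v,2) as the sum (v-1) + (v-2) + ... + 1, the quantity A's inner while loop adds
def triSum : Nat → Int
  | 0 => 0
  | n + 1 => triSum n + (n + 1 : Nat)

lemma tri_eq (n : Nat) (r : Int) : digitAnagramsTri n r = r + triSum n := by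
  induction n generalizing r with
  | zero => simp [digitAnagramsTri, triSum]
  | succ m ih => simp [digitAnagramsTri, triSum, ih]; ring

lemma triSum_pred (c : Nat) (h : 1 ≤ c) : triSum (c - 1) + (c : Int) = triSum c := by
  obtain ⟨m, rfl⟩ := Nat.exists_eq_add_of_le h
  rw [Nat.add_comm 1 m]
  simp [triSum]

-- the common value both programs compute: sum over distinct keys of C(count, 2)
def pairCount (ks : List Int) : Int :=
  ∑ k ∈ ks.toFinset, triSum (List.count k ks - 1)

lemma pairCount_append (ks : List Int) (x : Int) :
    pairCount (ks ++ [x]) = pairCount ks + (List.count x ks : Int) := by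
  unfold pairCount
  have hcnt : ∀ k, List.count k (ks ++ [x]) = List.count k ks + if k = x then 1 else 0 := by
    intro k
    by_cases h : k = x
    · subst h; simp [List.count_append]
    · rw [List.count_append, List.count_singleton', if_neg (fun e => h e.symm), if_neg h]
  by_cases hx : x ∈ ks
  · have hxf : x ∈ ks.toFinset := by rwa [List.mem_toFinset]
    have hset : (ks ++ [x]).toFinset = ks.toFinset := by
      simp [List.toFinset_append]
      exact hx
    rw [hset, ← Finset.add_sum_erase _ _ hxf, ← Finset.add_sum_erase _ _ hxf]
    have h1 : 1 ≤ List.count x ks := List.one_le_count_iff.mpr hx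
    have hx' : triSum (List.count x (ks ++ [x]) - 1)
        = triSum (List.count x ks - 1) + (List.count x ks : Int) := by
      rw [hcnt x, if_pos rfl]
      have h2 : List.count x ks + 1 - 1 = List.count x ks := by omega
      rw [h2]
      exact (triSum_pred _ h1).symm
    have hrest : ∑ k ∈ ks.toFinset.erase x, triSum (List.count k (ks ++ [x]) - 1)
        = ∑ k ∈ ks.toFinset.erase x, triSum (List.count k ks - 1) := by
      refine Finset.sum_congr rfl (fun k hk => ?_)
      have hne : k ≠ x := (Finset.mem_erase.mp hk).1
      rw [hcnt k, if_neg hne]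
      simp
    rw [hx', hrest]
    ring
  · have hxf : x ∉ ks.toFinset := fun hm => hx (List.mem_toFinset.mp hm)
    have hset : (ks ++ [x]).toFinset = insert x ks.toFinset := by
      simp [List.toFinset_append]
    rw [hset, Finset.sum_insert hxf]
    have hx0 : List.count x ks = 0 := List.count_eq_zero.mpr hx
    have hx' : triSum (List.count x (ks ++ [x]) - 1) = 0 := by
      rw [hcnt x, if_pos rfl, hx0]
      simp [triSum]
    have hrest : ∑ k ∈ ks.toFinset, triSum (List.count k (ks ++ [x]) - 1)
        = ∑ k ∈ ks.toFinset, triSum (List.count k ks - 1) := by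
      refine Finset.sum_congr rfl (fun k hk => ?_)
      have hne : k ≠ x := by rintro rfl; exact hxf hk
      rw [hcnt k, if_neg hne]
      simp
    rw [hx', hrest, hx0]
    simp

-- ----- A's side: the triangular fold over the counter's values is pairCount -----
lemma a_side (ks : List Int) :
    ((PySem.Dict.counter ks).values).foldl (fun res val => digitAnagramsTri (val - 1).toNat res) 0
      = pairCount ks := by
  rw [PySem.Dict.values_eq_map_keys _ (PySem.Dict.nodup_keys_counter ks) 0]
  rw [List.foldl_map, PySem.Dict.keys_counter]
  rw [PySem.List.foldl_congr_mem _ _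
        (fun (r : Int) (k : Int) => r + triSum (List.count k ks - 1)) _
        (by
          intro r k _
          rw [tri_eq, PySem.Dict.getD_counter]
          congr 2
          omega)]
  rw [PySem.List.foldl_add]
  have hfin : (PySem.Set.ofList ks).toFinset = ks.toFinset := by
    ext k
    simp [PySem.Set.mem_ofList]
  rw [pairCount, ← hfin, List.sum_toFinset _ (PySem.Set.nodup_ofList ks)]
  simp

-- ----- B's side -----
lemma b_snd (ks : List Int) (r : Int) (d : PySem.Dict Int Int) :
    (ks.foldl (fun st k => (st.1 + st.2.getD k 0, st.2.insert k (st.2.getD k 0 + 1))) (r, d)).2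
      = ks.foldl (fun d k => d.insert k (d.getD k 0 + 1)) d := by
  induction ks generalizing r d with
  | nil => rfl
  | cons x t ih => simp [List.foldl, ih]

lemma b_side (ks : List Int) :
    (ks.foldl (fun st k => (st.1 + st.2.getD k 0, st.2.insert k (st.2.getD k 0 + 1)))
      ((0 : Int), (PySem.Dict.empty : PySem.Dict Int Int))).1 = pairCount ks := by
  induction ks using List.reverseRecOn with
  | nil => simp [pairCount]
  | append_singleton t x ih =>
    rw [List.foldl_append, pairCount_append, ← ih]
    simp [b_snd, PySem.Dict.foldl_insert_getD_add_one_eq_counter, PySem.Dict.getD_counter]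

lemma b_eq (a : List Int) : digitAnagrams_alt a = pairCount (a.map pyKey) := by
  unfold digitAnagrams_alt
  rw [← b_side (a.map pyKey), List.foldl_map]

-- ===== VERDICT (by name: the statement is the Claim_ definition above) =====
theorem digitAnagrams_spec : Claim_equal_digitAnagrams := by
  intro a _
  unfold Spec_digitAnagrams
  rw [b_eq]
  unfold digitAnagrams
  split_ifs with h
  · match a, h with
    | [], _ => simp [pairCount]
    | [x], _ => simp [pairCount, triSum]
    | (x :: y :: t), h => simp at h; omega
  · show (a.foldl (fun d num => d.modify (pyKey num) 0 (· + 1))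
        (PySem.Dict.empty : PySem.Dict Int Int)).values.foldl
        (fun res val => digitAnagramsTri (val - 1).toNat res) 0 = pairCount (a.map pyKey)
    rw [show (a.foldl (fun d num => d.modify (pyKey num) 0 (· + 1))
        (PySem.Dict.empty : PySem.Dict Int Int)) = PySem.Dict.counter (a.map pyKey) by
      rw [PySem.Dict.counter_eq_foldl, List.foldl_map]]
    exact a_side _
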